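-- pv_equiv track=rewrite | github.com/SpionSkummis/Advent-of-Code-2019 | Erik/day12.py | updatePlaneSpeed
-- ===== SOURCE A (Python) =====
-- def updatePlaneSpeed(planeList):
--     for moon1 in planeList:
--         moon1Pos = moon1[0]
--         for moon2 in planeList:
--             moon2Pos = moon2[0]
--             if(moon1Pos > moon2Pos):
--                 moon1[1] -= 1
--             elif(moon1Pos < moon2Pos):
--                 moon1[1] += 1
--     return planeList
-- ===== SOURCE B (Python) =====
-- def updatePlaneSpeed(planeList):
--     n = len(planeList)
--     cnt = {}
--     for m in planeList:
--         cnt[m[0]] = cnt.get(m[0], 0) + 1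
--     delta = {}
--     below = 0
--     for k in sorted(cnt):
--         c = cnt[k]
--         delta[k] = (n - below - c) - below
--         below += c
--     for m in planeList:
--         m[1] += delta[m[0]]
--     return planeList
-- ===== Notes on version B (the rewrite author's own statement) =====
-- stated objective: faster
-- what changed: Replaces the all-pairs O(n^2) comparison with one counting pass (a position->count dict), a prefix-sum sweep over the sorted distinct positions that precomputes each position's velocity delta (#greater - #less), and one application pass.
-- outside the precondition, e.g. on updatePlaneSpeed([[5], [5]]): A returns [[5], [5]], B raises IndexError
import Mathlib
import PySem

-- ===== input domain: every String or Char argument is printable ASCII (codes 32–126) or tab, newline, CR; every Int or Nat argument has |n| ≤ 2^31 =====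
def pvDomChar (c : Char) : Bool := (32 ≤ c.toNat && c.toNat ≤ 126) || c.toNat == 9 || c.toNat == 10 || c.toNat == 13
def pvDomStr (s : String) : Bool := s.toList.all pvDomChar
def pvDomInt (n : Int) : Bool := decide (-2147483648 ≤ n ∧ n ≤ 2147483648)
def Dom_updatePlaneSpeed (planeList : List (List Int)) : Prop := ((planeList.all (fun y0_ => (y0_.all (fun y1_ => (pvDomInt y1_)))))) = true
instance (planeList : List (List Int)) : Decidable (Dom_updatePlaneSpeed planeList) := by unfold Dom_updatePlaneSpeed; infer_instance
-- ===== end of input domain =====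

-- B replaces A's all-pairs comparison by a counting dict + one prefix-sum sweep over the
-- sorted distinct positions (faster, measured); both Pythons mutate planeList in place —
-- the equivalence proved here is about the RETURN value (which aliases the mutated input).

-- ===== PORT A =====
-- A mutates only index 1 of each inner list and reads only index 0 of the others, so the
-- in-place double loop is exactly this map-over-foldl (no interference between moons).
def updatePlaneSpeed (planeList : List (List Int)) : List (List Int) :=
  planeList.map (fun moon1 =>
    let moon1Pos := PySem.List.pyGetD moon1 0 0
    planeList.foldl (fun m1 moon2 =>
      let moon2Pos := PySem.List.pyGetD moon2 0 0
      if moon1Pos > moon2Pos then PySem.List.pySetD m1 1 (PySem.List.pyGetD m1 1 0 - 1)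
      else if moon1Pos < moon2Pos then PySem.List.pySetD m1 1 (PySem.List.pyGetD m1 1 0 + 1)
      else m1) moon1)

-- ===== PORT B =====
def updatePlaneSpeed_alt (planeList : List (List Int)) : List (List Int) :=
  let n : Int := PySem.List.len planeList
  let cnt : PySem.Dict Int Int := planeList.foldl
      (fun d m => d.insert (PySem.List.pyGetD m 0 0) (d.getD (PySem.List.pyGetD m 0 0) 0 + 1))
      PySem.Dict.empty
  let delta : PySem.Dict Int Int × Int :=
    (PySem.List.sorted cnt.keys (fun x => x) false).foldl
      (fun s k =>
        let c := cnt.getD k 0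
        (s.1.insert k ((n - s.2 - c) - s.2), s.2 + c))
      (PySem.Dict.empty, 0)
  planeList.map (fun m =>
    PySem.List.pySetD m 1 (PySem.List.pyGetD m 1 0 + delta.1.getD (PySem.List.pyGetD m 0 0) 0))

-- ===== PRECONDITION & SPEC =====
-- Pre_ excludes lists containing an inner list of fewer than 2 entries: there A raises
-- IndexError except in the accidental corner where all positions are equal (the mutating
-- branches never fire and A returns the input), while B's single unconditional
-- `m[1] += delta[m[0]]` still raises.
def Pre_updatePlaneSpeed (planeList : List (List Int)) : Prop :=
  ∀ m ∈ planeList, 2 ≤ m.length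
instance (planeList : List (List Int)) : Decidable (Pre_updatePlaneSpeed planeList) := by
  unfold Pre_updatePlaneSpeed; infer_instance
def pvWitness_updatePlaneSpeed : List (List Int) := [[3, 0], [5, 0], [3, 1]]
def Spec_updatePlaneSpeed (planeList : List (List Int)) (out : List (List Int)) : Prop := out = updatePlaneSpeed_alt planeList
instance (planeList : List (List Int)) (out : List (List Int)) : Decidable (Spec_updatePlaneSpeed planeList out) := by unfold Spec_updatePlaneSpeed; infer_instance

-- ===== CLAIM (what is proved, stated in full; the proofs are below) =====
def Claim_equal_updatePlaneSpeed : Prop := ∀ (planeList : List (List Int)), Dom_updatePlaneSpeed planeList → Pre_updatePlaneSpeed planeList → Spec_updatePlaneSpeed planeList (updatePlaneSpeed planeList)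

-- ===== LEMMAS AND PROOFS =====

-- countP of a disjunction of disjoint predicates splits.
theorem pv_countP_or (l : List Int) (a b : Int → Bool)
    (h : ∀ x ∈ l, ¬(a x = true ∧ b x = true)) :
    l.countP (fun x => a x || b x) = l.countP a + l.countP b := by
  induction l with
  | nil => simp
  | cons x xs ih =>
      have hx := h x (by simp)
      have ih' := ih (fun y hy => h y (List.mem_cons_of_mem _ hy))
      rw [List.countP_cons, List.countP_cons, List.countP_cons, ih']
      by_cases ha : a x = true
      · have hb : b x = false := by
          cases hbb : b x
          · rfl
          · exact absurd ⟨ha, hbb⟩ hx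
        simp [ha, hb]
        omega
      · simp only [Bool.not_eq_true] at ha
        cases hb : b x <;> simp [ha, hb] <;> omega

-- summing l.count over the distinct keys below p gives countP (< p)
theorem pv_sum_counts (p : Int) (l : List Int) :
    ∀ (ks : List Int), ks.Nodup →
      (((ks.filter (fun k => decide (k < p))).map (fun k => l.count k)).sum
        = (l.filter (fun x => decide (x ∈ ks))).countP (fun q => decide (q < p))) := by
  intro ks
  induction ks with
  | nil => simp
  | cons k0 ks' ih =>
      intro hnd
      rw [List.nodup_cons] at hnd
      have hsplit : (l.filter (fun x => decide (x ∈ k0 :: ks'))).countP (fun q => decide (q < p))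
          = l.countP (fun x => (decide (x = k0) && decide (x < p)) || (decide (x ∈ ks') && decide (x < p))) := by
        rw [List.countP_filter]
        apply List.countP_congr
        intro x _
        by_cases h1 : x = k0 <;> by_cases h2 : x ∈ ks' <;> by_cases h3 : x < p <;> simp [h1, h2, h3]
      have hdisj : ∀ x ∈ l, ¬((decide (x = k0) && decide (x < p)) = true ∧ (decide (x ∈ ks') && decide (x < p)) = true) := by
        intro x _ ⟨hx1, hx2⟩
        simp at hx1 hx2
        exact hnd.1 (hx1.1 ▸ hx2.1)
      have heq2 : (l.filter (fun x => decide (x ∈ ks'))).countP (fun q => decide (q < p))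
          = l.countP (fun x => decide (x ∈ ks') && decide (x < p)) := by
        rw [List.countP_filter]
        apply List.countP_congr
        intro x _
        by_cases h1 : x ∈ ks' <;> by_cases h2 : x < p <;> simp [h1, h2]
      have ihv := ih hnd.2
      rw [heq2] at ihv
      rw [hsplit, pv_countP_or l _ _ hdisj]
      by_cases hk : k0 < p
      · have hfc : (k0 :: ks').filter (fun k => decide (k < p))
            = k0 :: ks'.filter (fun k => decide (k < p)) := by
          simp [hk]
        have ha' : l.countP (fun x => decide (x = k0) && decide (x < p)) = l.count k0 := by
          rw [List.count]
          apply List.countP_congr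
          intro x _
          by_cases h1 : x = k0 <;> simp [h1, hk]
        rw [hfc, List.map_cons, List.sum_cons, ha', ihv]
      · have hfc : (k0 :: ks').filter (fun k => decide (k < p))
            = ks'.filter (fun k => decide (k < p)) := by
          simp [hk]
        have ha' : l.countP (fun x => decide (x = k0) && decide (x < p)) = 0 := by
          rw [List.countP_eq_zero]
          intro x _
          simp
          intro h1
          omega
        rw [hfc, ha', ihv]
        omega

-- untouched keys pass through B's sweep
theorem pv_sweep_noTouch (f : Int → Int) (n : Int) :
    ∀ (ks : List Int) (d : PySem.Dict Int Int) (b p : Int), p ∉ ks →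
      ((ks.foldl (fun s k => (s.1.insert k ((n - s.2 - f k) - s.2), s.2 + f k)) (d, b)).1.getD p 0)
        = d.getD p 0 := by
  intro ks
  induction ks with
  | nil => intro d b p _; rfl
  | cons k0 ks' ih =>
      intro d b p hp
      simp only [List.mem_cons, not_or] at hp
      simp only [List.foldl_cons]
      rw [ih _ _ _ hp.2, PySem.Dict.getD_insert_of_ne _ _ _ hp.1]

-- B's sweep assigns to each key p the value (n - below - f p) - below with
-- below = b + Σ_{k ∈ ks, k < p} f k (keys strictly increasing).
theorem pv_sweep_getD (f : Int → Int) (n : Int) :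
    ∀ (ks : List Int) (d : PySem.Dict Int Int) (b p : Int),
      ks.Pairwise (· < ·) → p ∈ ks →
      ((ks.foldl (fun s k => (s.1.insert k ((n - s.2 - f k) - s.2), s.2 + f k)) (d, b)).1.getD p 0)
        = (n - (b + ((ks.filter (fun k => decide (k < p))).map f).sum) - f p)
            - (b + ((ks.filter (fun k => decide (k < p))).map f).sum) := by
  intro ks
  induction ks with
  | nil => intro d b p _ hp; simp at hp
  | cons k0 ks' ih =>
      intro d b p hpw hp
      rw [List.pairwise_cons] at hpw
      simp only [List.foldl_cons]
      rcases List.mem_cons.mp hp with h0 | hmem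
      · subst h0
        have hnot : p ∉ ks' := fun hc => lt_irrefl p (hpw.1 p hc)
        rw [pv_sweep_noTouch f n ks' _ _ p hnot, PySem.Dict.getD_insert_self]
        have hfilt : (p :: ks').filter (fun k => decide (k < p)) = [] := by
          rw [List.filter_eq_nil_iff]
          intro k hk
          rcases List.mem_cons.mp hk with h | h
          · simp [h]
          · simp; exact le_of_lt (hpw.1 k h)
        rw [hfilt]; simp
  -- p in the tail
      · have hk0p : k0 < p := hpw.1 p hmem
        rw [ih _ _ _ hpw.2 hmem]
        have hfilt : (k0 :: ks').filter (fun k => decide (k < p))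
            = k0 :: ks'.filter (fun k => decide (k < p)) := by
          simp [hk0p]
        rw [hfilt]
        simp only [List.map_cons, List.sum_cons]
        ring_nf

-- A's inner loop, started from m.set 1 v, adds (#greater - #less) to v.
theorem pv_afold (p1 : Int) (m : List Int) (hm : 1 < m.length) :
    ∀ (ms : List (List Int)) (v : Int),
      ms.foldl (fun m1 moon2 =>
        if p1 > PySem.List.pyGetD moon2 0 0 then PySem.List.pySetD m1 1 (PySem.List.pyGetD m1 1 0 - 1)
        else if p1 < PySem.List.pyGetD moon2 0 0 then PySem.List.pySetD m1 1 (PySem.List.pyGetD m1 1 0 + 1)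
        else m1) (m.set 1 v)
      = m.set 1 (v + (ms.countP (fun m2 => decide (p1 < PySem.List.pyGetD m2 0 0)) : Int)
                   - (ms.countP (fun m2 => decide (PySem.List.pyGetD m2 0 0 < p1)) : Int)) := by
  intro ms
  induction ms with
  | nil => intro v; simp
  | cons m2 ms' ih =>
      intro v
      have hlen : 1 < (m.set 1 v).length := by simpa using hm
      have hget : PySem.List.pyGetD (m.set 1 v) 1 0 = v := by
        rw [PySem.List.pyGetD_eq_getElem (m.set 1 v) 0 (by omega) (by simp; omega)]
        simp
      have hset : ∀ w : Int, PySem.List.pySetD (m.set 1 v) 1 w = m.set 1 w := by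
        intro w
        rw [PySem.List.pySetD_of_nonneg _ _ (by omega)]
        simp [List.set_set]
      simp only [List.foldl_cons]
      by_cases h1 : PySem.List.pyGetD m2 0 0 < p1
      · have h1' : ¬ p1 < PySem.List.pyGetD m2 0 0 := by omega
        simp only [gt_iff_lt, h1, if_true, hget, hset, ih]
        congr 1
        simp [h1, h1']
        push_cast
        ring
      · by_cases h2 : p1 < PySem.List.pyGetD m2 0 0
        · simp only [gt_iff_lt, h1, if_false, h2, if_true, hget, hset, ih]
          congr 1
          simp [h1, h2]
          push_cast
          ring
        · simp only [gt_iff_lt, h1, h2, if_false, ih]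
          congr 1
          simp [h1, h2]

-- trichotomy of counts
theorem pv_tricho (p : Int) (l : List Int) :
    l.countP (fun q => decide (q < p)) + l.countP (fun q => decide (p < q)) + l.count p
      = l.length := by
  induction l with
  | nil => simp
  | cons x xs ih =>
      simp only [List.countP_cons, List.count_cons, List.length_cons, decide_eq_true_eq, beq_iff_eq]
      split_ifs <;> omega

-- ===== VERDICT (by name: the statement is the Claim_ definition above) =====
theorem updatePlaneSpeed_spec : Claim_equal_updatePlaneSpeed := by
  intro pl _hdom hpre
  unfold Spec_updatePlaneSpeed
  show updatePlaneSpeed pl = updatePlaneSpeed_alt pl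
  simp only [updatePlaneSpeed, updatePlaneSpeed_alt, PySem.List.len_eq]
  have hcnt : (pl.foldl (fun d m => d.insert (PySem.List.pyGetD m 0 0) (d.getD (PySem.List.pyGetD m 0 0) 0 + 1)) PySem.Dict.empty)
      = PySem.Dict.counter (pl.map (fun m => PySem.List.pyGetD m 0 0)) := by
    rw [← PySem.Dict.foldl_insert_getD_add_one_eq_counter, List.foldl_map]
  rw [hcnt, PySem.Dict.keys_counter]
  simp only [PySem.Dict.getD_counter]
  apply List.map_congr_left
  intro moon hmoon
  set l := pl.map (fun m => PySem.List.pyGetD m 0 0) with hl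
  set p1 := PySem.List.pyGetD moon 0 0 with hp1
  have hlen : 2 ≤ moon.length := hpre moon hmoon
  have hmem : p1 ∈ l := by rw [hl, hp1]; exact List.mem_map_of_mem hmoon
  have hA := pv_afold p1 moon (by omega) pl (moon[1]'(by omega))
  rw [List.set_getElem_self] at hA
  set ks := PySem.List.sorted (PySem.Set.ofList l) (fun x => x) with hks'
  have hks : List.Pairwise (· < ·) ks := PySem.List.sorted_ofList_pairwise_lt l
  have hpks : p1 ∈ ks := by
    rw [hks']
    exact (PySem.List.mem_sorted _ _ _ _).mpr ((PySem.Set.mem_ofList _ _).mpr hmem)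
  have hnd : ks.Nodup := hks.imp (fun h => ne_of_lt h)
  have hsweep := pv_sweep_getD (fun k => ((l.count k : Int))) ((pl.length : Int)) ks PySem.Dict.empty 0 p1 hks hpks
  simp only at hsweep
  rw [hA, hsweep]
  have hfl : l.filter (fun x => decide (x ∈ ks)) = l := by
    apply List.filter_eq_self.mpr
    intro a ha
    simp only [decide_eq_true_eq]
    rw [hks']
    exact (PySem.List.mem_sorted _ _ _ _).mpr ((PySem.Set.mem_ofList _ _).mpr ha)
  have hsum := pv_sum_counts p1 l ks hnd
  rw [hfl] at hsum
  have hcast : ((ks.filter (fun k => decide (k < p1))).map (fun k => ((l.count k : Int)))).sum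
      = ((l.countP (fun q => decide (q < p1)) : Int)) := by
    rw [← hsum]
    push_cast
    rw [List.map_map]
    rfl
  rw [hcast]
  have hGT : (pl.countP (fun m2 => decide (p1 < PySem.List.pyGetD m2 0 0))) = l.countP (fun q => decide (p1 < q)) := by
    rw [hl, List.countP_map]
    rfl
  have hLT : (pl.countP (fun m2 => decide (PySem.List.pyGetD m2 0 0 < p1))) = l.countP (fun q => decide (q < p1)) := by
    rw [hl, List.countP_map]
    rfl
  rw [hGT, hLT]
  have htri := pv_tricho p1 l
  have hlen2 : l.length = pl.length := by rw [hl]; exact List.length_map ..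
  rw [PySem.List.pySetD_of_nonneg _ _ (by omega)]
  rw [PySem.List.pyGetD_eq_getElem moon 0 (by omega) (by push_cast; omega)]
  simp only [Int.toNat_one]
  congr 1
  omega
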